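-- pv_equiv track=rewrite | github.com/Leapense/problems | 29213번： Колевская бухгалтерия/Колевская бухгалтерия.py | count_possible_triples
-- ===== SOURCE A (Python) =====
-- def count_possible_triples(a, b, c):
--     count = 0
--     for A in range(a, a + c + 1):
--         for Z in range(b, b + c + 1):
--             R = c - (A - a) - (Z - b)
--             if R >= 0 and A > Z:  # Change the equality condition to strict greater
--                 count += 1
--     return count
-- ===== SOURCE B (Python) =====
-- def count_possible_triples(a, b, c):
--     total = 0
--     for i in range(c + 1):
--         total += max(0, min(c - i + 1, a + i - b))
--     return total
-- ===== Notes on version B (the rewrite author's own statement) =====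
-- stated objective: faster
-- what changed: Replaced the quadratic double loop over all (A,Z) pairs by a single loop that adds, for each outer index i, the closed-form length max(0, min(c-i+1, a+i-b)) of the interval of valid Z values.
import Mathlib
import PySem

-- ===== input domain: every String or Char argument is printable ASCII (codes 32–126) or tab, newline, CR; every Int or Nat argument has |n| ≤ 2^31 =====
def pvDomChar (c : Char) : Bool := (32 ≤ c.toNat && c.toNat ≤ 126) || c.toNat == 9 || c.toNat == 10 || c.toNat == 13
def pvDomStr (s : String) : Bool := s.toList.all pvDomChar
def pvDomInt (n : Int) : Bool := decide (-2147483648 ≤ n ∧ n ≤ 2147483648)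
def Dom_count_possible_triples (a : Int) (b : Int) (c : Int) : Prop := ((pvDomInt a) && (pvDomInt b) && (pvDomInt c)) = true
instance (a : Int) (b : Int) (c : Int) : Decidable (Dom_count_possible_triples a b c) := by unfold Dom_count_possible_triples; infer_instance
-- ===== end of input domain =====

-- B replaces A's quadratic double loop by a single loop adding a closed-form
-- interval length per outer index (objective: faster, asymptotic O(c^2) → O(c)).

-- ===== PORT A =====
def count_possible_triples (a : Int) (b : Int) (c : Int) : Int :=
  (PySem.List.pyRange a (a + c + 1) 1).foldl (fun count A =>
    (PySem.List.pyRange b (b + c + 1) 1).foldl (fun count Z =>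
      let R := c - (A - a) - (Z - b)
      if R ≥ 0 ∧ A > Z then count + 1 else count) count) 0

-- ===== PORT B =====
def count_possible_triples_alt (a : Int) (b : Int) (c : Int) : Int :=
  (PySem.List.pyRange 0 (c + 1) 1).foldl
    (fun total i => total + max 0 (min (c - i + 1) (a + i - b))) 0

-- ===== PRECONDITION & SPEC =====
def Spec_count_possible_triples (a : Int) (b : Int) (c : Int) (out : Int) : Prop := out = count_possible_triples_alt a b c
instance (a : Int) (b : Int) (c : Int) (out : Int) : Decidable (Spec_count_possible_triples a b c out) := by unfold Spec_count_possible_triples; infer_instance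

-- ===== CLAIM (what is proved, stated in full; the proofs are below) =====
def Claim_equal_count_possible_triples : Prop := ∀ (a : Int) (b : Int) (c : Int), Dom_count_possible_triples a b c → Spec_count_possible_triples a b c (count_possible_triples a b c)

-- ===== LEMMAS AND PROOFS =====

-- Number of z in [lo, lo+n) with z < t, as a clamped interval length.
theorem countP_pyRange_lt (n : Nat) (lo t : Int) :
    ((PySem.List.pyRange lo (lo + n) 1).countP (fun z => decide (z < t)) : Int)
      = max 0 (min (lo + n) (max lo t) - lo) := by
  induction n generalizing lo with
  | zero =>
      rw [PySem.List.pyRange_one_eq_nil (by omega)]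
      simp only [List.countP_nil, Nat.cast_zero]
      omega
  | succ n ih =>
      rw [PySem.List.pyRange_one_cons (by omega)]
      have harg : lo + ((n + 1 : Nat) : Int) = (lo + 1) + (n : Nat) := by push_cast; ring
      rw [harg, List.countP_cons]
      push_cast
      rw [ih (lo + 1)]
      by_cases hlt : lo < t
      · simp only [hlt, decide_true, if_true]
        omega
      · simp only [hlt, decide_false, Bool.false_eq_true, if_false]
        omega

theorem count_possible_triples_spec : Claim_equal_count_possible_triples := by
  intro a b c _
  unfold Spec_count_possible_triples count_possible_triples count_possible_triples_alt
  by_cases hc : c + 1 ≤ 0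
  · rw [PySem.List.pyRange_one_eq_nil (show a + c + 1 ≤ a by omega),
        PySem.List.pyRange_one_eq_nil (show c + 1 ≤ 0 by omega)]
    rfl
  · -- rewrite each inner loop as a countP, then both sides as sums over List.range
    have hfun : (fun (count A : Int) =>
        (PySem.List.pyRange b (b + c + 1) 1).foldl (fun count Z =>
          let R := c - (A - a) - (Z - b)
          if R ≥ 0 ∧ A > Z then count + 1 else count) count)
      = (fun (count A : Int) => count + ((PySem.List.pyRange b (b + c + 1) 1).countP
          (fun Z => decide (Z < min (b + c - (A - a) + 1) A)) : Int)) := by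
      funext count A
      show (PySem.List.pyRange b (b + c + 1) 1).foldl (fun count Z =>
          if c - (A - a) - (Z - b) ≥ 0 ∧ A > Z then count + 1 else count) count = _
      rw [PySem.List.foldl_ite_add_one]
      congr 1
      refine congrArg Nat.cast (List.countP_congr ?_)
      intro Z hZ
      simp only [decide_eq_true_eq]
      omega
    rw [hfun]
    rw [PySem.List.foldl_add, PySem.List.foldl_add]
    simp only [zero_add]
    rw [PySem.List.pyRange_one a (a + c + 1), PySem.List.pyRange_one 0 (c + 1)]
    have hn : (a + c + 1 - a).toNat = (c + 1 - 0).toNat := by omega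
    rw [hn]
    rw [List.map_map, List.map_map]
    refine congrArg _ (List.map_congr_left ?_)
    intro k hk
    rw [List.mem_range] at hk
    have hkc : (k : Int) < c + 1 := by
      have : (k : Int) < ((c + 1 - 0).toNat : Int) := by exact_mod_cast hk
      omega
    simp only [Function.comp]
    have hb : b + c + 1 = b + ((c + 1).toNat : Nat) := by omega
    rw [hb, countP_pyRange_lt]
    have : (((c+1).toNat : Nat) : Int) = c + 1 := by omega
    rw [this]
    omega
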